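-- pv_equiv track=rewrite | github.com/codygeary/ROAD | bin/Dragon_python/trace_analysis.py | _compute_barriers
-- ===== SOURCE A (Python) =====
-- from typing import List, Optional
--
-- KL_DELAY          = 150  # nt delay before KLs "snap closed" in topology check
--
-- def _compute_barriers(struc_array: List[str], pair_map: List[int], nt: int) -> List[str]:
--     """
--     Topology checker: marks structural barriers in the folding pathway.
--
--     x = open pair (potential barrier)
--     X = blocked pair (barrier reached)
--     ~ = ambiguous / partially blocked
--     ◦ = clear
--     """
--     hollow     = '\u25e6'
--     barriers   = [hollow] * nt
--     topo_count = 0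
--
--     for i in range(nt):
--         ch = struc_array[i]
--         mi = pair_map[i]
--
--         if ch == '.':
--             barriers[i] = hollow
--             topo_count  = 0
--
--         elif ch == '(':
--             barriers[i] = 'x'
--             topo_count  = 0
--
--         elif ch == ')':
--             if barriers[mi] == 'x':
--                 barriers[i]  = hollow
--                 barriers[mi] = hollow
--                 topo_count   = 0
--             elif barriers[mi] == 'X':
--                 if topo_count > 5:
--                     barriers[i]  = 'X'
--                     barriers[mi] = '~'
--                 else:
--                     barriers[i]  = '~'
--                     barriers[mi] = '~'
--                 topo_count += 1
--
--         # KL closure: after KL_DELAY nts, mark intervening sequence as blocked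
--         if i > KL_DELAY:
--             delayed_i = i - KL_DELAY
--             if struc_array[delayed_i] == ']':
--                 barriers[delayed_i]         = hollow
--                 barriers[pair_map[delayed_i]] = hollow
--                 for k in range(pair_map[delayed_i], delayed_i):
--                     if barriers[k] == 'x':
--                         barriers[k] = 'X'
--
--     return barriers
-- ===== SOURCE B (Python) =====
-- # B: keeps a sorted list of the positions currently marked 'x' so the KL-closure
-- # step visits only the live 'x' positions (binary search + slice) instead of
-- # rescanning the whole [pair, delayed_i) range.
-- from typing import List
--
-- KL_DELAY = 150  # nt delay before KLs "snap closed" in topology check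
--
--
-- def _bisect_left(xs: List[int], v: int) -> int:
--     lo, hi = 0, len(xs)
--     while lo < hi:
--         mid = (lo + hi) // 2
--         if xs[mid] < v:
--             lo = mid + 1
--         else:
--             hi = mid
--     return lo
--
--
-- def _compute_barriers(struc_array: List[str], pair_map: List[int], nt: int) -> List[str]:
--     hollow = '\u25e6'
--     barriers = [hollow] * nt
--     topo_count = 0
--     xpos: List[int] = []  # sorted list of positions p with barriers[p] == 'x'
--
--     for i in range(nt):
--         ch = struc_array[i]
--         mi = pair_map[i]
--
--         if ch == '.':
--             barriers[i] = hollow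
--             topo_count = 0
--         elif ch == '(':
--             barriers[i] = 'x'
--             xpos.append(i)
--             topo_count = 0
--         elif ch == ')':
--             bm = barriers[mi]
--             if bm == 'x':
--                 barriers[i] = hollow
--                 barriers[mi] = hollow
--                 del xpos[_bisect_left(xpos, mi)]
--                 topo_count = 0
--             elif bm == 'X':
--                 if topo_count > 5:
--                     barriers[i] = 'X'
--                     barriers[mi] = '~'
--                 else:
--                     barriers[i] = '~'
--                     barriers[mi] = '~'
--                 topo_count += 1
--
--         if i > KL_DELAY:
--             d = i - KL_DELAY
--             if struc_array[d] == ']':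
--                 p = pair_map[d]
--                 if barriers[p] == 'x':
--                     del xpos[_bisect_left(xpos, p)]
--                 barriers[d] = hollow
--                 barriers[p] = hollow
--                 lo = _bisect_left(xpos, p)
--                 hi = _bisect_left(xpos, d)
--                 for k in xpos[lo:hi]:
--                     barriers[k] = 'X'
--                 del xpos[lo:hi]
--
--     return barriers
-- ===== Notes on version B (the rewrite author's own statement) =====
-- stated objective: alternative
-- what changed: B maintains a sorted list of positions currently marked 'x' (appended in increasing order, removed by hand-rolled binary search), so the KL-closure step converts only the live 'x' positions in [pair_map[d], d) via two binary searches and a slice instead of rescanning the whole range for every ']'.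
-- outside the precondition, e.g. on _compute_barriers(['(', ')'], [1, -2], 2): A returns ['◦', '◦'], B returns ['◦', '◦']
import Mathlib
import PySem

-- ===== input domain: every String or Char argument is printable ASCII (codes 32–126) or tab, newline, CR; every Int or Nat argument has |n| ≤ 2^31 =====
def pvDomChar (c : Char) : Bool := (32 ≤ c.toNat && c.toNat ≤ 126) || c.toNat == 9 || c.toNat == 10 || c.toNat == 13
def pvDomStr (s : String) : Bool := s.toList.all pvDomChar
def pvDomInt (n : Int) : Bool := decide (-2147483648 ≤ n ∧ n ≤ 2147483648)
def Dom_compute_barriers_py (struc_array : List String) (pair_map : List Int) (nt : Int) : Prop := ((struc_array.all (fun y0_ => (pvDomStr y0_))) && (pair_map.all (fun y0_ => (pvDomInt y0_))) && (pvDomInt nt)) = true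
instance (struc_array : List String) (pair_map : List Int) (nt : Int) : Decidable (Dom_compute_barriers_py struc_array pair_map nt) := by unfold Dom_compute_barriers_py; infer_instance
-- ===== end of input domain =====

-- B replaces A's per-']' rescan of the whole [pair_map[d], d) range by a sorted list of the
-- positions currently marked 'x', maintained by binary search (an alternative algorithm).

-- ===== PORT A =====
def pvHollow : String := "◦"

-- 'for k in range(pair_map[delayed_i], delayed_i): if barriers[k] == 'x': barriers[k] = 'X''
def pvAKLoop (b : List String) (lo hi : Int) : List String :=
  (PySem.List.pyRange lo hi 1).foldl
    (fun bb k => if PySem.List.pyGetD bb k "" = "x" then PySem.List.pySetD bb k "X" else bb) b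

-- the '.', '(', ')' branch cascade of A's loop body
def pvAMain (b : List String) (topo : Int) (ch : String) (mi i : Int) : List String × Int :=
  if ch = "." then (PySem.List.pySetD b i pvHollow, 0)
  else if ch = "(" then (PySem.List.pySetD b i "x", 0)
  else if ch = ")" then
    if PySem.List.pyGetD b mi "" = "x" then
      (PySem.List.pySetD (PySem.List.pySetD b i pvHollow) mi pvHollow, 0)
    else if PySem.List.pyGetD b mi "" = "X" then
      if topo > 5 then (PySem.List.pySetD (PySem.List.pySetD b i "X") mi "~", topo + 1)
      else (PySem.List.pySetD (PySem.List.pySetD b i "~") mi "~", topo + 1)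
    else (b, topo)
  else (b, topo)

-- the 'if i > KL_DELAY' block of A's loop body
def pvAKL (struc : List String) (pair : List Int) (b : List String) (i : Int) : List String :=
  if i > 150 then
    let d := i - 150
    if PySem.List.pyGetD struc d "" = "]" then
      let p := PySem.List.pyGetD pair d 0
      pvAKLoop (PySem.List.pySetD (PySem.List.pySetD b d pvHollow) p pvHollow) p d
    else b
  else b

def pvAStep (struc : List String) (pair : List Int) (st : List String × Int) (i : Int) :
    List String × Int :=
  let ch := PySem.List.pyGetD struc i ""
  let mi := PySem.List.pyGetD pair i 0
  let st2 := pvAMain st.1 st.2 ch mi i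
  (pvAKL struc pair st2.1 i, st2.2)

def compute_barriers_py (struc_array : List String) (pair_map : List Int) (nt : Int) : List String :=
  ((PySem.List.pyRange 0 nt 1).foldl (pvAStep struc_array pair_map)
    (List.replicate nt.toNat pvHollow, 0)).1

-- ===== PORT B =====
-- hand-rolled bisect_left of Source B (while lo < hi: mid = (lo+hi)//2 ...); lo, hi, mid are
-- nonnegative throughout in Python, so Nat with Nat division is exact
def pvBSearchGo (xs : List Int) (v : Int) (lo hi : Nat) : Nat :=
  if _h : lo < hi then
    let mid := (lo + hi) / 2
    if xs.getD mid 0 < v then pvBSearchGo xs v (mid + 1) hi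
    else pvBSearchGo xs v lo mid
  else lo
termination_by hi - lo
decreasing_by all_goals omega

def pvBisect (xs : List Int) (v : Int) : Nat := pvBSearchGo xs v 0 xs.length

-- the branch cascade of B's loop body (also maintains xs, the sorted 'x' positions)
def pvBMain (b : List String) (topo : Int) (xs : List Int) (ch : String) (mi i : Int) :
    List String × Int × List Int :=
  if ch = "." then (PySem.List.pySetD b i pvHollow, 0, xs)
  else if ch = "(" then (PySem.List.pySetD b i "x", 0, xs ++ [i])
  else if ch = ")" then
    let bm := PySem.List.pyGetD b mi ""
    if bm = "x" then
      (PySem.List.pySetD (PySem.List.pySetD b i pvHollow) mi pvHollow, 0,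
        xs.eraseIdx (pvBisect xs mi))
    else if bm = "X" then
      if topo > 5 then (PySem.List.pySetD (PySem.List.pySetD b i "X") mi "~", topo + 1, xs)
      else (PySem.List.pySetD (PySem.List.pySetD b i "~") mi "~", topo + 1, xs)
    else (b, topo, xs)
  else (b, topo, xs)

-- B's 'if i > KL_DELAY' block: binary-search the live 'x' positions in [p, d), convert them,
-- and delete that slice ('del xpos[lo:hi]' = take lo ++ drop (max lo hi): Python slices clamp)
def pvBKL (struc : List String) (pair : List Int) (b : List String) (xs : List Int) (i : Int) :
    List String × List Int :=
  if i > 150 then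
    let d := i - 150
    if PySem.List.pyGetD struc d "" = "]" then
      let p := PySem.List.pyGetD pair d 0
      let xs1 := if PySem.List.pyGetD b p "" = "x" then xs.eraseIdx (pvBisect xs p) else xs
      let b1 := PySem.List.pySetD (PySem.List.pySetD b d pvHollow) p pvHollow
      let lo := pvBisect xs1 p
      let hi := pvBisect xs1 d
      let b2 := ((xs1.drop lo).take (hi - lo)).foldl
        (fun bb k => PySem.List.pySetD bb k "X") b1
      (b2, xs1.take lo ++ xs1.drop (max lo hi))
    else (b, xs)
  else (b, xs)

def pvBStep (struc : List String) (pair : List Int) (st : List String × Int × List Int) (i : Int) :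
    List String × Int × List Int :=
  let ch := PySem.List.pyGetD struc i ""
  let mi := PySem.List.pyGetD pair i 0
  let st2 := pvBMain st.1 st.2.1 st.2.2 ch mi i
  let kl := pvBKL struc pair st2.1 st2.2.2 i
  (kl.1, st2.2.1, kl.2)

def compute_barriers_py_alt (struc_array : List String) (pair_map : List Int) (nt : Int) :
    List String :=
  ((PySem.List.pyRange 0 nt 1).foldl (pvBStep struc_array pair_map)
    (List.replicate nt.toNat pvHollow, 0, ([] : List Int))).1

-- ===== PRECONDITION & SPEC =====
-- Pre_ excludes the inputs where A raises IndexError (nt beyond a list's length, or a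
-- dereferenced pair_map entry ≥ nt), and the inputs with a NEGATIVE pair_map entry at a
-- dereferenced ')' or ']' position: there A still returns, but only through Python's
-- accidental wrap-around indexing of the barriers list, which B's position set does not track.
def Pre_compute_barriers_py (struc_array : List String) (pair_map : List Int) (nt : Int) : Prop :=
  nt ≤ struc_array.length ∧ nt ≤ pair_map.length ∧
  ∀ i < nt.toNat,
    (struc_array.getD i "" = ")" → 0 ≤ pair_map.getD i 0 ∧ pair_map.getD i 0 < nt) ∧
    (1 ≤ i → (i : Int) + 150 < nt → struc_array.getD i "" = "]" →
      0 ≤ pair_map.getD i 0 ∧ pair_map.getD i 0 < nt)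
instance (struc_array : List String) (pair_map : List Int) (nt : Int) :
    Decidable (Pre_compute_barriers_py struc_array pair_map nt) := by
  unfold Pre_compute_barriers_py; infer_instance

def pvWitness_compute_barriers_py : List String × List Int × Int := (["(", ")"], [1, 0], 2)

def Spec_compute_barriers_py (struc_array : List String) (pair_map : List Int) (nt : Int) (out : List String) : Prop := out = compute_barriers_py_alt struc_array pair_map nt
instance (struc_array : List String) (pair_map : List Int) (nt : Int) (out : List String) : Decidable (Spec_compute_barriers_py struc_array pair_map nt out) := by unfold Spec_compute_barriers_py; infer_instance

-- ===== CLAIM (what is proved, stated in full; the proofs are below) =====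
def Claim_equal_compute_barriers_py : Prop := ∀ (struc_array : List String) (pair_map : List Int) (nt : Int), Dom_compute_barriers_py struc_array pair_map nt → Pre_compute_barriers_py struc_array pair_map nt → Spec_compute_barriers_py struc_array pair_map nt (compute_barriers_py struc_array pair_map nt)

-- ===== LEMMAS AND PROOFS =====
-- on a strictly sorted list, 'element < v' is 'index < countP (< v)'
theorem pv_sorted_lt_iff (xs : List Int) (v : Int) (hs : xs.Pairwise (· < ·)) :
    ∀ j (hj : j < xs.length), (xs[j] < v ↔ j < xs.countP (fun x => decide (x < v))) := by
  induction xs with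
  | nil => intro j hj; simp at hj
  | cons a l ih =>
    have hs' := (List.pairwise_cons.mp hs)
    intro j hj
    by_cases ha : a < v
    · have hc : (a :: l).countP (fun x => decide (x < v)) =
        l.countP (fun x => decide (x < v)) + 1 := by
        simp [ha]
      cases j with
      | zero => simpa [hc] using ha
      | succ m =>
        have hm : m < l.length := by simpa using hj
        have h2 := ih hs'.2 m hm
        simp only [List.getElem_cons_succ, hc]
        constructor
        · intro h3; exact Nat.succ_lt_succ (h2.mp h3)
        · intro h3; exact h2.mpr (Nat.lt_of_succ_lt_succ h3)
    · have hcl : l.countP (fun x => decide (x < v)) = 0 := by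
        rw [List.countP_eq_zero]
        intro x hx
        simp only [decide_eq_true_eq]
        exact not_lt.mpr (le_trans (not_lt.mp ha) (le_of_lt (hs'.1 x hx)))
      have hc : (a :: l).countP (fun x => decide (x < v)) = 0 := by
        simp [ha, hcl]
      rw [hc]
      simp only [Nat.not_lt_zero, iff_false]
      cases j with
      | zero => simpa using ha
      | succ m =>
        have hm : m < l.length := by simpa using hj
        simp only [List.getElem_cons_succ]
        intro h3
        exact ha (lt_trans (hs'.1 _ (List.getElem_mem hm)) h3)

theorem pvBSearchGo_spec (xs : List Int) (v : Int) (c : Nat)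
    (hiff : ∀ j (hj : j < xs.length), (xs[j] < v ↔ j < c)) :
    ∀ (lo hi : Nat), hi ≤ xs.length → lo ≤ c → c ≤ hi → pvBSearchGo xs v lo hi = c := by
  suffices H : ∀ k lo hi, hi - lo ≤ k → hi ≤ xs.length → lo ≤ c → c ≤ hi →
      pvBSearchGo xs v lo hi = c by
    exact fun lo hi h1 h2 h3 => H (hi - lo) lo hi le_rfl h1 h2 h3
  intro k
  induction k with
  | zero =>
    intro lo hi h0 h1 h2 h3
    rw [pvBSearchGo]
    have hn : ¬ lo < hi := by omega
    simp only [hn, dif_neg, not_false_iff]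
    omega
  | succ m ih =>
    intro lo hi h0 h1 h2 h3
    rw [pvBSearchGo]
    by_cases hlh : lo < hi
    · simp only [hlh, ↓reduceDIte]
      have hmlen : (lo + hi) / 2 < xs.length := by omega
      have hget : xs.getD ((lo + hi) / 2) 0 = xs[(lo + hi) / 2] :=
        List.getD_eq_getElem xs 0 hmlen
      by_cases hlt : xs[(lo + hi) / 2] < v
      · rw [hget, if_pos hlt]
        exact ih _ _ (by omega) h1 ((hiff _ hmlen).mp hlt) h3
      · rw [hget, if_neg hlt]
        have : ¬ ((lo + hi) / 2 < c) := fun hh => hlt ((hiff _ hmlen).mpr hh)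
        exact ih _ _ (by omega) (by omega) h2 (by omega)
    · simp only [hlh, dif_neg, not_false_iff]
      omega

theorem pvBisect_eq (xs : List Int) (v : Int) (hs : xs.Pairwise (· < ·)) :
    pvBisect xs v = xs.countP (fun x => decide (x < v)) :=
  pvBSearchGo_spec xs v _ (pv_sorted_lt_iff xs v hs) 0 xs.length le_rfl (Nat.zero_le _)
    (List.countP_le_length)

-- elements before / after the bisection point
theorem pv_mem_take_lt (xs : List Int) (v : Int) (hs : xs.Pairwise (· < ·)) :
    ∀ k ∈ xs.take (xs.countP (fun x => decide (x < v))), k < v := by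
  intro k hk
  obtain ⟨i, hi, rfl⟩ := List.mem_iff_getElem.mp hk
  have hi' : i < xs.length := by
    have := hi; simp [List.length_take] at this; omega
  rw [List.getElem_take]
  exact (pv_sorted_lt_iff xs v hs i hi').mpr (by simp [List.length_take] at hi; omega)

theorem pv_mem_drop_ge (xs : List Int) (v : Int) (hs : xs.Pairwise (· < ·)) :
    ∀ k ∈ xs.drop (xs.countP (fun x => decide (x < v))), ¬ k < v := by
  intro k hk
  obtain ⟨i, hi, rfl⟩ := List.mem_iff_getElem.mp hk
  have hi' : xs.countP (fun x => decide (x < v)) + i < xs.length := by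
    simp [List.length_drop] at hi; omega
  rw [List.getElem_drop]
  intro hlt
  have := (pv_sorted_lt_iff xs v hs _ hi').mp hlt
  omega

theorem pvBisect_erase (xs : List Int) (v : Int) (hs : xs.Pairwise (· < ·)) (hv : v ∈ xs) :
    xs.eraseIdx (pvBisect xs v) = xs.filter (fun k => decide (k ≠ v)) := by
  rw [pvBisect_eq xs v hs]
  set c := xs.countP (fun x => decide (x < v)) with hc
  obtain ⟨j, hj, hjv⟩ := List.mem_iff_getElem.mp hv
  have hjc : c ≤ j := by
    by_contra h
    have := (pv_sorted_lt_iff xs v hs j hj).mpr (by omega)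
    omega
  have hclen : c < xs.length := lt_of_le_of_lt hjc hj
  have hxc : xs[c] = v := by
    rcases Nat.lt_or_ge c j with h | h
    · have := (List.pairwise_iff_getElem.mp hs) c j hclen hj h
      have h2 : ¬ xs[c] < v := fun hh => by
        have := (pv_sorted_lt_iff xs v hs c hclen).mp hh; omega
      omega
    · have hcj : c = j := le_antisymm hjc h
      simp only [hcj]
      exact hjv
  rw [List.eraseIdx_eq_take_drop_succ]
  have hdecomp : xs = xs.take c ++ xs[c] :: xs.drop (c + 1) := by
    conv_lhs => rw [← List.take_append_drop c xs]
    rw [List.drop_eq_getElem_cons hclen]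
  conv_rhs => rw [hdecomp]
  rw [List.filter_append, List.filter_cons]
  have h1 : (xs.take c).filter (fun k => decide (k ≠ v)) = xs.take c := by
    apply List.filter_eq_self.mpr
    intro k hk
    have := pv_mem_take_lt xs v hs k hk
    simp; omega
  have h2 : (xs.drop (c + 1)).filter (fun k => decide (k ≠ v)) = xs.drop (c + 1) := by
    apply List.filter_eq_self.mpr
    intro k hk
    obtain ⟨i, hi, rfl⟩ := List.mem_iff_getElem.mp hk
    have hi' : c + 1 + i < xs.length := by simp [List.length_drop] at hi; omega
    rw [List.getElem_drop]
    have := (List.pairwise_iff_getElem.mp hs) c (c + 1 + i) hclen hi' (by omega)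
    simp; omega
  simp only [ne_eq, decide_not] at h1 h2
  simp [hxc, h1, h2]

-- no element lies in [p, d) when bisect p ≥ bisect d
theorem pv_no_mid (xs : List Int) (p d : Int) (hs : xs.Pairwise (· < ·))
    (h : xs.countP (fun x => decide (x < d)) ≤ xs.countP (fun x => decide (x < p))) :
    ∀ k ∈ xs, ¬ (p ≤ k ∧ k < d) := by
  intro k hk ⟨hp, hd⟩
  obtain ⟨j, hj, rfl⟩ := List.mem_iff_getElem.mp hk
  have h1 := (pv_sorted_lt_iff xs d hs j hj).mp hd
  have h2 : ¬ (j < xs.countP (fun x => decide (x < p))) := fun hh =>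
    absurd ((pv_sorted_lt_iff xs p hs j hj).mpr hh) (by omega)
  omega

theorem pv_mid_decomp (xs : List Int) (cp cd : Nat) (hcp : cp ≤ cd) (_hcd : cd ≤ xs.length) :
    xs = xs.take cp ++ ((xs.drop cp).take (cd - cp) ++ xs.drop cd) := by
  conv_lhs => rw [← List.take_append_drop cp xs]
  congr 1
  conv_lhs => rw [← List.take_append_drop (cd - cp) (xs.drop cp)]
  rw [List.drop_drop]
  congr 2
  omega

theorem pv_mem_mid (xs : List Int) (p d : Int) (hs : xs.Pairwise (· < ·))
    (k : Int)
    (hk : k ∈ (xs.drop (xs.countP (fun x => decide (x < p)))).take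
      (xs.countP (fun x => decide (x < d)) - xs.countP (fun x => decide (x < p)))) :
    p ≤ k ∧ k < d := by
  obtain ⟨i, hi, rfl⟩ := List.mem_iff_getElem.mp hk
  have hlen := List.countP_le_length (p := fun x => decide (x < d)) (l := xs)
  rw [List.getElem_take, List.getElem_drop]
  have hi' : xs.countP (fun x => decide (x < p)) + i < xs.length := by
    simp [List.length_take, List.length_drop] at hi; omega
  have hidx : i < xs.countP (fun x => decide (x < d)) - xs.countP (fun x => decide (x < p)) := by
    simp [List.length_take] at hi; omega
  constructor
  · by_contra hh
    have := (pv_sorted_lt_iff xs p hs _ hi').mp (by omega)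
    omega
  · exact (pv_sorted_lt_iff xs d hs _ hi').mpr (by omega)

theorem pvBisect_slice (xs : List Int) (p d : Int) (hs : xs.Pairwise (· < ·)) :
    (xs.drop (pvBisect xs p)).take (pvBisect xs d - pvBisect xs p) =
      xs.filter (fun k => decide (p ≤ k) && decide (k < d)) := by
  rw [pvBisect_eq xs p hs, pvBisect_eq xs d hs]
  by_cases h : xs.countP (fun x => decide (x < d)) ≤ xs.countP (fun x => decide (x < p))
  · rw [List.filter_eq_nil_iff.mpr, Nat.sub_eq_zero_of_le h, List.take_zero]
    intro k hk
    have := pv_no_mid xs p d hs h k hk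
    simp only [Bool.and_eq_true, decide_eq_true_eq, not_and]
    intro h1 h2
    exact this ⟨h1, h2⟩
  · have hcd : xs.countP (fun x => decide (x < d)) ≤ xs.length := List.countP_le_length
    conv_rhs => rw [pv_mid_decomp xs (xs.countP (fun x => decide (x < p))) (xs.countP (fun x => decide (x < d))) (by omega) hcd]
    rw [List.filter_append, List.filter_append]
    have h1 : (xs.take (xs.countP (fun x => decide (x < p)))).filter
        (fun k => decide (p ≤ k) && decide (k < d)) = [] := by
      apply List.filter_eq_nil_iff.mpr
      intro k hk
      have := pv_mem_take_lt xs p hs k hk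
      simp; omega
    have h2 : ((xs.drop (xs.countP (fun x => decide (x < p)))).take
        (xs.countP (fun x => decide (x < d)) - xs.countP (fun x => decide (x < p)))).filter
        (fun k => decide (p ≤ k) && decide (k < d)) = _ := List.filter_eq_self.mpr (by
      intro k hk
      have := pv_mem_mid xs p d hs k hk
      simp; omega)
    have h3 : (xs.drop (xs.countP (fun x => decide (x < d)))).filter
        (fun k => decide (p ≤ k) && decide (k < d)) = [] := by
      apply List.filter_eq_nil_iff.mpr
      intro k hk
      have := pv_mem_drop_ge xs d hs k hk
      simp; omega
    rw [h1, h2, h3]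
    simp

theorem pvBisect_rest (xs : List Int) (p d : Int) (hs : xs.Pairwise (· < ·)) :
    xs.take (pvBisect xs p) ++ xs.drop (max (pvBisect xs p) (pvBisect xs d)) =
      xs.filter (fun k => !(decide (p ≤ k) && decide (k < d))) := by
  rw [pvBisect_eq xs p hs, pvBisect_eq xs d hs]
  by_cases h : xs.countP (fun x => decide (x < d)) ≤ xs.countP (fun x => decide (x < p))
  · rw [Nat.max_eq_left h, List.take_append_drop]
    symm
    apply List.filter_eq_self.mpr
    intro k hk
    have := pv_no_mid xs p d hs h k hk
    simp; omega
  · have hcd : xs.countP (fun x => decide (x < d)) ≤ xs.length := List.countP_le_length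
    rw [Nat.max_eq_right (by omega)]
    conv_rhs => rw [pv_mid_decomp xs (xs.countP (fun x => decide (x < p))) (xs.countP (fun x => decide (x < d))) (by omega) hcd]
    rw [List.filter_append, List.filter_append]
    have h1 : (xs.take (xs.countP (fun x => decide (x < p)))).filter
        (fun k => !(decide (p ≤ k) && decide (k < d))) = _ := List.filter_eq_self.mpr (by
      intro k hk
      have := pv_mem_take_lt xs p hs k hk
      simp; omega)
    have h2 : ((xs.drop (xs.countP (fun x => decide (x < p)))).take
        (xs.countP (fun x => decide (x < d)) - xs.countP (fun x => decide (x < p)))).filter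
        (fun k => !(decide (p ≤ k) && decide (k < d))) = [] := by
      apply List.filter_eq_nil_iff.mpr
      intro k hk
      have := pv_mem_mid xs p d hs k hk
      simp; omega
    have h3 : (xs.drop (xs.countP (fun x => decide (x < d)))).filter
        (fun k => !(decide (p ≤ k) && decide (k < d))) = _ := List.filter_eq_self.mpr (by
      intro k hk
      have := pv_mem_drop_ge xs d hs k hk
      simp; omega)
    rw [h1, h2, h3]
    simp

def pvXs (b : List String) : List Int :=
  ((List.range b.length).filter (fun p => b.getD p "" = "x")).map (fun p => Int.ofNat p)

theorem pv_getD_set_ne {α : Type} [Inhabited α] (l : List α) (i j : Nat) (v d : α) (h : i ≠ j) :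
    (l.set i v).getD j d = l.getD j d := by
  rcases Nat.lt_or_ge j l.length with hj | hj
  · rw [List.getD_eq_getElem _ _ (by simpa using hj), List.getD_eq_getElem _ _ hj]
    exact List.getElem_set_ne h _
  · rw [List.getD_eq_default _ _ (by simpa using hj), List.getD_eq_default _ _ hj]

theorem pv_getD_set_self {α : Type} [Inhabited α] (l : List α) (i : Nat) (v d : α)
    (h : i < l.length) : (l.set i v).getD i d = v := by
  rw [List.getD_eq_getElem _ _ (by simpa using h)]
  simp

theorem pvXs_mem (b : List String) (k : Int) :
    k ∈ pvXs b ↔ 0 ≤ k ∧ k.toNat < b.length ∧ b.getD k.toNat "" = "x" := by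
  unfold pvXs
  simp only [List.mem_map, List.mem_filter, List.mem_range, decide_eq_true_eq]
  constructor
  · rintro ⟨p, ⟨hp, hx⟩, rfl⟩
    refine ⟨Int.natCast_nonneg p, ?_, ?_⟩
    · simpa using hp
    · simpa using hx
  · rintro ⟨h0, hlt, hx⟩
    exact ⟨k.toNat, ⟨hlt, hx⟩, Int.toNat_of_nonneg h0⟩

theorem pvXs_sorted (b : List String) : (pvXs b).Pairwise (· < ·) := by
  unfold pvXs
  refine List.pairwise_map.mpr ?_
  refine List.Pairwise.filter _ ?_
  exact (List.pairwise_lt_range).imp (fun h => by simpa using Int.ofNat_lt.mpr h)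

theorem pvXs_congr (b2 b1 : List String) (hlen : b2.length = b1.length)
    (h : ∀ q < b1.length, (b2.getD q "" = "x" ↔ b1.getD q "" = "x")) :
    pvXs b2 = pvXs b1 := by
  unfold pvXs
  rw [hlen]
  congr 1
  apply List.filter_congr
  intro p hp
  exact decide_eq_decide.mpr (h p (List.mem_range.mp hp))

theorem pvXs_filter (b2 b1 : List String) (Q : Int → Prop) [DecidablePred Q]
    (hlen : b2.length = b1.length)
    (h : ∀ q < b1.length, (b2.getD q "" = "x" ↔ (b1.getD q "" = "x" ∧ Q (Int.ofNat q)))) :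
    pvXs b2 = (pvXs b1).filter (fun k => decide (Q k)) := by
  unfold pvXs
  rw [hlen, List.filter_map, List.filter_filter]
  congr 1
  apply List.filter_congr
  intro p hp
  have hpq := h p (List.mem_range.mp hp)
  simp only [Function.comp]
  by_cases h1 : b2.getD p "" = "x" <;> by_cases h2 : b1.getD p "" = "x" <;>
    by_cases h3 : Q (Int.ofNat p) <;> simp_all

theorem pvXs_replicate (n : Nat) (v : String) (hv : v ≠ "x") :
    pvXs (List.replicate n v) = [] := by
  unfold pvXs
  rw [List.map_eq_nil_iff, List.filter_eq_nil_iff]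
  intro p hp
  have hp' := List.mem_range.mp hp
  simp only [decide_eq_true_eq]
  rw [List.getD_eq_getElem _ _ (by simpa using hp')]
  simpa using hv

theorem pvXs_append (b : List String) (i : Nat) (hi : i < b.length)
    (hx : ∀ p < b.length, b.getD p "" = "x" → p < i) :
    pvXs (b.set i "x") = pvXs b ++ [Int.ofNat i] := by
  unfold pvXs
  rw [List.length_set]
  have hsplit : b.length = (i + 1) + (b.length - i - 1) := by omega
  rw [hsplit, List.range_add, List.range_succ]
  rw [List.filter_append, List.filter_append, List.filter_append, List.filter_append,
    List.map_append, List.map_append, List.map_append, List.map_append]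
  have e1 : (List.range i).filter (fun p => decide ((b.set i "x").getD p "" = "x"))
      = (List.range i).filter (fun p => decide (b.getD p "" = "x")) := by
    apply List.filter_congr
    intro p hp
    have := List.mem_range.mp hp
    rw [pv_getD_set_ne b i p "x" "" (by omega)]
  have e2 : [i].filter (fun p => decide ((b.set i "x").getD p "" = "x")) = [i] := by
    simp only [List.filter_cons, List.filter_nil]
    rw [show ((b.set i "x").getD i "") = "x" from pv_getD_set_self b i "x" "" hi]
    simp
  have e3 : [i].filter (fun p => decide (b.getD p "" = "x")) = [] := by
    simp only [List.filter_cons, List.filter_nil]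
    have hni : ¬ (b.getD i "" = "x") := fun hh => by have := hx i hi hh; omega
    simp only [decide_eq_true_eq]
    rw [if_neg hni]
  have e4 : ∀ (f : List String), (∀ p, i < p → p < f.length → f.getD p "" ≠ "x") →
      ((List.range (b.length - i - 1)).map (fun k => (i + 1) + k)).filter
        (fun p => decide (f.getD p "" = "x")) = [] := by
    intro f hf
    apply List.filter_eq_nil_iff.mpr
    intro p hp
    obtain ⟨k, hk, rfl⟩ := List.mem_map.mp hp
    simp only [decide_eq_true_eq]
    intro hcon
    rcases Nat.lt_or_ge (i + 1 + k) f.length with hlt | hge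
    · exact hf _ (by omega) hlt hcon
    · rw [List.getD_eq_default _ _ hge] at hcon
      exact absurd hcon (by decide)
  have e4b := e4 (b.set i "x") (by
    intro p hpi hp hxp
    rw [pv_getD_set_ne b i p "x" "" (by omega)] at hxp
    have := hx p (by simp at hp; omega) hxp
    omega)
  have e4a := e4 b (by
    intro p hpi hp hxp
    have := hx p hp hxp
    omega)
  rw [e1, e2, e3, e4a, e4b]
  simp
theorem pv_pyGetD_toNat (xs : List String) (i : Int) (h : 0 ≤ i) (d : String) :
    PySem.List.pyGetD xs i d = xs.getD i.toNat d := by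
  rcases Nat.lt_or_ge i.toNat xs.length with hlt | hge
  · rw [PySem.List.pyGetD_eq_getElem xs d h (by omega)]
    rw [List.getD_eq_getElem _ _ hlt]
  · rw [List.getD_eq_default _ _ hge]
    apply PySem.List.pyGetD_of_none
    rw [PySem.List.pyGet?_eq_none_iff]
    unfold PySem.Raise.InRange
    omega

theorem pv_foldl_length {β : Type} (f : List String → β → List String)
    (h : ∀ b k, (f b k).length = b.length) :
    ∀ (l : List β) (b : List String), (l.foldl f b).length = b.length := by
  intro l
  induction l with
  | nil => intro b; rfl
  | cons a t ih => intro b; rw [List.foldl_cons, ih, h]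

theorem length_pvAKLoop (b : List String) (lo hi : Int) :
    (pvAKLoop b lo hi).length = b.length := by
  apply pv_foldl_length
  intro bb k
  by_cases hx : PySem.List.pyGetD bb k "" = "x"
  · simp [hx, PySem.List.length_pySetD]
  · simp [hx]

theorem pvAKLoop_getD : ∀ (n : Nat) (b : List String) (lo hi : Int), (hi - lo).toNat = n →
    0 ≤ lo → ∀ (q : Nat), q < b.length →
    (pvAKLoop b lo hi).getD q "" =
      if lo ≤ (q : Int) ∧ (q : Int) < hi ∧ b.getD q "" = "x" then "X" else b.getD q "" := by
  intro n
  induction n using Nat.strong_induction_on with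
  | _ n ih =>
    intro b lo hi hn hlo q hq
    rcases Int.lt_or_le lo hi with hlh | hlh
    case inr =>
      unfold pvAKLoop
      rw [PySem.List.pyRange_one_eq_nil hlh, List.foldl_nil]
      rw [if_neg (by omega)]
    case inl =>
      have hstep : pvAKLoop b lo hi = pvAKLoop
          (if b.getD lo.toNat "" = "x" then b.set lo.toNat "X" else b) (lo + 1) hi := by
        unfold pvAKLoop
        rw [PySem.List.pyRange_one_cons hlh, List.foldl_cons,
          pv_pyGetD_toNat b lo hlo "", PySem.List.pySetD_of_nonneg b "X" hlo]
      rw [hstep]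
      set b' := if b.getD lo.toNat "" = "x" then b.set lo.toNat "X" else b with hb'
      have hlen' : b'.length = b.length := by
        rw [hb']; split <;> simp
      have := ih (hi - (lo + 1)).toNat (by omega) b' (lo + 1) hi rfl (by omega) q (by omega)
      rw [this]
      by_cases hql : q = lo.toNat
      · by_cases hbx : b.getD q "" = "x"
        · have hb'q : b'.getD q "" = "X" := by
            rw [hb', if_pos (by rw [← hql]; exact hbx), hql]
            exact pv_getD_set_self b lo.toNat "X" "" (by omega)
          rw [hb'q]
          rw [if_neg (fun hcon => absurd hcon.2.2 (by decide))]
          rw [if_pos ⟨by omega, by omega, hbx⟩]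
        · have hb'q : b'.getD q "" = b.getD q "" := by
            rw [hb', if_neg (by rw [← hql]; exact hbx)]
          rw [hb'q, if_neg (fun hcon => hbx hcon.2.2), if_neg (fun hcon => hbx hcon.2.2)]
      · have hb'q : b'.getD q "" = b.getD q "" := by
          rw [hb']; split
          · exact pv_getD_set_ne b lo.toNat q "X" "" (fun hh => hql hh.symm)
          · rfl
        rw [hb'q]
        congr 1
        simp only [eq_iff_iff]
        constructor
        · intro hcon; exact ⟨by omega, hcon.2⟩
        · intro hcon
          refine ⟨?_, hcon.2⟩
          rcases Int.lt_or_le lo (q : Int) with h2 | h2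
          · omega
          · exfalso; apply hql; omega

theorem length_pvFoldX (seg : List Int) (b : List String) :
    (seg.foldl (fun bb k => PySem.List.pySetD bb k "X") b).length = b.length :=
  pv_foldl_length _ (fun bb k => PySem.List.length_pySetD bb k "X") seg b

theorem pvFoldX_getD (seg : List Int) : ∀ (b : List String), (∀ k ∈ seg, 0 ≤ k) →
    ∀ (q : Nat), q < b.length →
    (seg.foldl (fun bb k => PySem.List.pySetD bb k "X") b).getD q "" =
      if (Int.ofNat q) ∈ seg then "X" else b.getD q "" := by
  induction seg with
  | nil => intro b _ q hq; simp
  | cons a t ih =>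
    intro b hpos q hq
    rw [List.foldl_cons]
    have ha : 0 ≤ a := hpos a List.mem_cons_self
    have hset : PySem.List.pySetD b a "X" = b.set a.toNat "X" :=
      PySem.List.pySetD_of_nonneg b "X" ha
    have hlen : (PySem.List.pySetD b a "X").length = b.length :=
      PySem.List.length_pySetD b a "X"
    rw [ih _ (fun k hk => hpos k (List.mem_cons_of_mem a hk)) q (by omega)]
    by_cases hqt : (Int.ofNat q) ∈ t
    · rw [if_pos hqt, if_pos (List.mem_cons_of_mem a hqt)]
    · rw [if_neg hqt]
      by_cases hqa : (Int.ofNat q) = a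
      · rw [if_pos (by rw [← hqa]; exact List.mem_cons_self), hset, ← hqa]
        exact pv_getD_set_self b q "X" "" hq
      · rw [if_neg (by intro hc; rcases List.mem_cons.mp hc with h | h; exact hqa h; exact hqt h)]
        rw [hset]
        exact pv_getD_set_ne b a.toNat q "X" "" (fun hh => hqa (by
          rw [show Int.ofNat q = (q : Int) from rfl]; omega))

-- pvXs is unchanged by overwriting a non-'x' cell with a non-'x' value
theorem pvXs_set_not_x (b : List String) (j : Nat) (v : String) (hv : v ≠ "x")
    (hjx : b.getD j "" ≠ "x") : pvXs (b.set j v) = pvXs b := by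
  apply pvXs_congr _ _ (by simp)
  intro q hq
  rcases eq_or_ne j q with rfl | hne
  · rw [pv_getD_set_self b j v "" (by omega)]
    exact ⟨fun h => absurd h hv, fun h => absurd h hjx⟩
  · rw [pv_getD_set_ne b j q v "" hne]

theorem pvMain_agree (struc : List String) (n iN : Nat) (b : List String) (t : Int) (mi : Int)
    (hlen : b.length = n) (hiN : iN < n)
    (hx : ∀ p, p < n → b.getD p "" = "x" → p < iN ∧ struc.getD p "" = "(")
    (hmi : struc.getD iN "" = ")" → 0 ≤ mi ∧ mi < (n : Int)) :
    pvBMain b t (pvXs b) (struc.getD iN "") mi (iN : Int) =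
      ((pvAMain b t (struc.getD iN "") mi (iN : Int)).1,
       (pvAMain b t (struc.getD iN "") mi (iN : Int)).2,
       pvXs (pvAMain b t (struc.getD iN "") mi (iN : Int)).1) ∧
    (pvAMain b t (struc.getD iN "") mi (iN : Int)).1.length = n ∧
    (∀ p, p < n → (pvAMain b t (struc.getD iN "") mi (iN : Int)).1.getD p "" = "x" →
      p < iN + 1 ∧ struc.getD p "" = "(") := by
  have hsetI : ∀ v : String, PySem.List.pySetD b (iN : Int) v = b.set iN v := fun v => by simp
  have hbiN : b.getD iN "" ≠ "x" := fun hcon => by have := hx iN hiN hcon; omega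
  by_cases h1 : struc.getD iN "" = "."
  · simp only [pvAMain, pvBMain, if_pos h1, hsetI]
    refine ⟨?_, by simp [hlen], ?_⟩
    · rw [pvXs_set_not_x b iN pvHollow (by decide) hbiN]
    · intro p hp hxp
      rcases eq_or_ne iN p with rfl | hne
      · rw [pv_getD_set_self b iN pvHollow "" (by omega)] at hxp
        exact absurd hxp (by decide)
      · rw [pv_getD_set_ne b iN p pvHollow "" hne] at hxp
        have hq := hx p hp hxp
        exact ⟨by omega, hq.2⟩
  by_cases h2 : struc.getD iN "" = "("
  · simp only [pvAMain, pvBMain, if_neg h1, if_pos h2, hsetI]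
    refine ⟨?_, by simp [hlen], ?_⟩
    · rw [pvXs_append b iN (by omega) (fun p hp hxp => (hx p (by omega) hxp).1)]
      rfl
    · intro p hp hxp
      rcases eq_or_ne iN p with rfl | hne
      · exact ⟨by omega, h2⟩
      · rw [pv_getD_set_ne b iN p "x" "" hne] at hxp
        have hq := hx p hp hxp
        exact ⟨by omega, hq.2⟩
  by_cases h3 : struc.getD iN "" = ")"
  case pos =>
    obtain ⟨hmi0, hmin⟩ := hmi h3
    have hmit : mi.toNat < n := by omega
    have hgmi : PySem.List.pyGetD b mi "" = b.getD mi.toNat "" := pv_pyGetD_toNat b mi hmi0 ""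
    have hsetmi : ∀ (l : List String) (v : String),
        PySem.List.pySetD l mi v = l.set mi.toNat v := fun l v =>
      PySem.List.pySetD_of_nonneg l v hmi0
    by_cases h4 : PySem.List.pyGetD b mi "" = "x"
    · have hbmx : b.getD mi.toNat "" = "x" := by rw [← hgmi]; exact h4
      have hmilt : mi.toNat < iN ∧ struc.getD mi.toNat "" = "(" := hx mi.toNat (by omega) hbmx
      have hneqi : mi.toNat ≠ iN := by omega
      simp only [pvAMain, pvBMain, if_neg h1, if_neg h2, if_pos h3, if_pos h4, hsetI, hsetmi]
      have hxs : pvXs ((b.set iN pvHollow).set mi.toNat pvHollow) =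
          (pvXs b).filter (fun k => decide (k ≠ mi)) := by
        apply pvXs_filter _ _ (fun k => k ≠ mi) (by simp)
        intro q hq
        rcases eq_or_ne q mi.toNat with he | hqm
        · rw [he, pv_getD_set_self _ mi.toNat pvHollow "" (by simp; omega)]
          constructor
          · intro hcon; exact absurd hcon (by decide)
          · intro hcon
            exfalso; apply hcon.2
            rw [show Int.ofNat mi.toNat = ((mi.toNat : Nat) : Int) from rfl]
            omega
        · rw [pv_getD_set_ne _ mi.toNat q pvHollow "" (fun hh => hqm hh.symm)]
          rcases eq_or_ne q iN with rfl | hqi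
          · rw [pv_getD_set_self b q pvHollow "" (by omega)]
            constructor
            · intro hcon; exact absurd hcon (by decide)
            · intro hcon; exact absurd hcon.1 hbiN
          · rw [pv_getD_set_ne b iN q pvHollow "" (fun hh => hqi hh.symm)]
            constructor
            · intro hcon
              refine ⟨hcon, ?_⟩
              rw [show Int.ofNat q = (q : Int) from rfl]
              omega
            · intro hcon; exact hcon.1
      have hers : (pvXs b).eraseIdx (pvBisect (pvXs b) mi) =
          (pvXs b).filter (fun k => decide (k ≠ mi)) := by
        apply pvBisect_erase _ _ (pvXs_sorted b)
        exact (pvXs_mem b mi).mpr ⟨hmi0, by omega, hbmx⟩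
      refine ⟨?_, by simp [hlen], ?_⟩
      · rw [hxs, hers]
      · intro p hp hxp
        rcases eq_or_ne p mi.toNat with he | hpm
        · rw [he, pv_getD_set_self _ mi.toNat pvHollow "" (by simp; omega)] at hxp
          exact absurd hxp (by decide)
        · rw [pv_getD_set_ne _ mi.toNat p pvHollow "" (fun hh => hpm hh.symm)] at hxp
          rcases eq_or_ne p iN with he2 | hpi
          · rw [he2, pv_getD_set_self b iN pvHollow "" (by omega)] at hxp
            exact absurd hxp (by decide)
          · rw [pv_getD_set_ne b iN p pvHollow "" (fun hh => hpi hh.symm)] at hxp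
            have hq := hx p hp hxp
            exact ⟨by omega, hq.2⟩
    · by_cases h5 : PySem.List.pyGetD b mi "" = "X"
      · have hbmX : b.getD mi.toNat "" = "X" := by rw [← hgmi]; exact h5
        have key : ∀ v : String, v ≠ "x" →
            pvXs ((b.set iN v).set mi.toNat "~") = pvXs b ∧
            (∀ p, p < n → ((b.set iN v).set mi.toNat "~").getD p "" = "x" →
              p < iN + 1 ∧ struc.getD p "" = "(") := by
          intro v hv
          constructor
          · rw [pvXs_set_not_x _ mi.toNat "~" (by decide) (by
              rcases eq_or_ne mi.toNat iN with he | hne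
              · rw [he, pv_getD_set_self b iN v "" (by omega)]; exact hv
              · rw [pv_getD_set_ne b iN mi.toNat v "" (fun hh => hne hh.symm), hbmX]
                decide)]
            rw [pvXs_set_not_x b iN v hv hbiN]
          · intro p hp hxp
            rcases eq_or_ne p mi.toNat with he | hpm
            · rw [he, pv_getD_set_self _ mi.toNat "~" "" (by simp; omega)] at hxp
              exact absurd hxp (by decide)
            · rw [pv_getD_set_ne _ mi.toNat p "~" "" (fun hh => hpm hh.symm)] at hxp
              rcases eq_or_ne p iN with he2 | hpi
              · rw [he2, pv_getD_set_self b iN v "" (by omega)] at hxp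
                exact absurd hxp hv
              · rw [pv_getD_set_ne b iN p v "" (fun hh => hpi hh.symm)] at hxp
                have hq := hx p hp hxp
                exact ⟨by omega, hq.2⟩
        by_cases h6 : t > 5
        · simp only [pvAMain, pvBMain, if_neg h1, if_neg h2, if_pos h3, if_neg h4, if_pos h5,
            if_pos h6, hsetI, hsetmi]
          obtain ⟨k1, k2⟩ := key "X" (by decide)
          exact ⟨by rw [k1], by simp [hlen], k2⟩
        · simp only [pvAMain, pvBMain, if_neg h1, if_neg h2, if_pos h3, if_neg h4, if_pos h5,
            if_neg h6, hsetI, hsetmi]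
          obtain ⟨k1, k2⟩ := key "~" (by decide)
          exact ⟨by rw [k1], by simp [hlen], k2⟩
      · simp only [pvAMain, pvBMain, if_neg h1, if_neg h2, if_pos h3, if_neg h4, if_neg h5]
        refine ⟨by trivial, hlen, ?_⟩
        intro p hp hxp
        have hq := hx p hp hxp
        exact ⟨by omega, hq.2⟩
  case neg =>
    simp only [pvAMain, pvBMain, if_neg h1, if_neg h2, if_neg h3]
    refine ⟨by trivial, hlen, ?_⟩
    intro p hp hxp
    have hq := hx p hp hxp
    exact ⟨by omega, hq.2⟩

theorem pvKL_agree (struc : List String) (pair : List Int) (n iN : Nat) (b : List String)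
    (hlen : b.length = n) (hiN : iN < n)
    (hx : ∀ p, p < n → b.getD p "" = "x" → struc.getD p "" = "(")
    (hkl : iN > 150 → struc.getD (iN - 150) "" = "]" →
      0 ≤ pair.getD (iN - 150) 0 ∧ pair.getD (iN - 150) 0 < (n : Int)) :
    pvBKL struc pair b (pvXs b) (iN : Int) =
      (pvAKL struc pair b (iN : Int), pvXs (pvAKL struc pair b (iN : Int))) ∧
    (pvAKL struc pair b (iN : Int)).length = n ∧
    (∀ p, p < n → (pvAKL struc pair b (iN : Int)).getD p "" = "x" → b.getD p "" = "x") := by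
  by_cases h150 : (iN : Int) > 150
  case neg =>
    simp only [pvAKL, pvBKL, if_neg h150]
    exact ⟨by trivial, hlen, fun p hp hxp => hxp⟩
  case pos =>
    have hiN150 : iN > 150 := by omega
    have dInt : (iN : Int) - 150 = ((iN - 150 : Nat) : Int) := by omega
    have hgd : PySem.List.pyGetD struc ((iN : Int) - 150) "" = struc.getD (iN - 150) "" := by
      rw [dInt, PySem.List.pyGetD_natCast]
    by_cases hbr : struc.getD (iN - 150) "" = "]"
    case neg =>
      simp only [pvAKL, pvBKL, if_pos h150, hgd, if_neg hbr]
      exact ⟨by trivial, hlen, fun p hp hxp => hxp⟩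
    case pos =>
      obtain ⟨hp0, hpn⟩ := hkl hiN150 hbr
      have hgp : PySem.List.pyGetD pair ((iN : Int) - 150) 0 = pair.getD (iN - 150) 0 := by
        rw [dInt, PySem.List.pyGetD_natCast]
      have hdnn : iN - 150 < n := by omega
      have hbd : b.getD (iN - 150) "" ≠ "x" := fun hc => by
        have := hx (iN - 150) hdnn hc
        rw [hbr] at this
        exact absurd this (by decide)
      have hptn : (pair.getD (iN - 150) 0).toNat < n := by omega
      have hsetd : PySem.List.pySetD b ((iN : Int) - 150) pvHollow =
          b.set (iN - 150) pvHollow := by rw [dInt, PySem.List.pySetD_natCast]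
      have hsetp : PySem.List.pySetD (b.set (iN - 150) pvHollow) (pair.getD (iN - 150) 0)
          pvHollow =
          (b.set (iN - 150) pvHollow).set (pair.getD (iN - 150) 0).toNat pvHollow :=
        PySem.List.pySetD_of_nonneg _ _ hp0
      have hgbp : PySem.List.pyGetD b (pair.getD (iN - 150) 0) "" =
          b.getD (pair.getD (iN - 150) 0).toNat "" := pv_pyGetD_toNat b _ hp0 ""
      have hlen1 :
          ((b.set (iN - 150) pvHollow).set (pair.getD (iN - 150) 0).toNat pvHollow).length
          = n := by rw [List.length_set, List.length_set, hlen]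
      have hb1get : ∀ q, q < n →
          ((b.set (iN - 150) pvHollow).set (pair.getD (iN - 150) 0).toNat pvHollow).getD q "" =
          if q = (pair.getD (iN - 150) 0).toNat then pvHollow
          else if q = iN - 150 then pvHollow
          else b.getD q "" := by
        intro q hq
        rcases eq_or_ne q (pair.getD (iN - 150) 0).toNat with he | h1
        · rw [if_pos he, he,
            pv_getD_set_self _ _ pvHollow "" (by rw [List.length_set, hlen]; omega)]
        · rw [if_neg h1, pv_getD_set_ne _ _ q pvHollow "" (fun hh => h1 hh.symm)]
          rcases eq_or_ne q (iN - 150) with he2 | h2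
          · rw [if_pos he2, he2, pv_getD_set_self b (iN - 150) pvHollow "" (by omega)]
          · rw [if_neg h2, pv_getD_set_ne b (iN - 150) q pvHollow "" (fun hh => h2 hh.symm)]
      have hxs1 : (if PySem.List.pyGetD b (pair.getD (iN - 150) 0) "" = "x" then
            (pvXs b).eraseIdx (pvBisect (pvXs b) (pair.getD (iN - 150) 0)) else pvXs b) =
          pvXs ((b.set (iN - 150) pvHollow).set (pair.getD (iN - 150) 0).toNat pvHollow) := by
        by_cases hbpx : b.getD (pair.getD (iN - 150) 0).toNat "" = "x"
        · rw [if_pos (by rw [hgbp]; exact hbpx)]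
          have hpd : (pair.getD (iN - 150) 0).toNat ≠ iN - 150 := fun hh => hbd (hh ▸ hbpx)
          rw [pvBisect_erase (pvXs b) (pair.getD (iN - 150) 0) (pvXs_sorted b)
            ((pvXs_mem b (pair.getD (iN - 150) 0)).mpr ⟨hp0, by omega, hbpx⟩)]
          symm
          apply pvXs_filter _ b (fun k => k ≠ pair.getD (iN - 150) 0) (by rw [hlen1, hlen])
          intro q hq
          rw [hb1get q (by omega)]
          rcases eq_or_ne q (pair.getD (iN - 150) 0).toNat with he | h1
          · rw [if_pos he]
            constructor
            · intro hcon; exact absurd hcon (by decide)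
            · intro hcon
              exfalso; apply hcon.2
              rw [he, show Int.ofNat (pair.getD (iN - 150) 0).toNat =
                (((pair.getD (iN - 150) 0).toNat : Nat) : Int) from rfl]
              omega
          · rw [if_neg h1]
            rcases eq_or_ne q (iN - 150) with he2 | h2
            · rw [if_pos he2]
              constructor
              · intro hcon; exact absurd hcon (by decide)
              · intro hcon; exact absurd (he2 ▸ hcon.1) hbd
            · rw [if_neg h2]
              constructor
              · intro hcon
                refine ⟨hcon, ?_⟩
                rw [show Int.ofNat q = ((q : Nat) : Int) from rfl]
                omega
              · intro hcon; exact hcon.1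
        · rw [if_neg (by rw [hgbp]; exact hbpx)]
          symm
          apply pvXs_congr _ b (by rw [hlen1, hlen])
          intro q hq
          rw [hb1get q (by omega)]
          rcases eq_or_ne q (pair.getD (iN - 150) 0).toNat with he | h1
          · rw [if_pos he]
            constructor
            · intro hcon; exact absurd hcon (by decide)
            · intro hcon; exact absurd (he ▸ hcon) hbpx
          · rw [if_neg h1]
            rcases eq_or_ne q (iN - 150) with he2 | h2
            · rw [if_pos he2]
              constructor
              · intro hcon; exact absurd hcon (by decide)
              · intro hcon; exact absurd (he2 ▸ hcon) hbd
            · rw [if_neg h2]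
      -- abbreviations used below
      generalize hb1eq :
        (b.set (iN - 150) pvHollow).set (pair.getD (iN - 150) 0).toNat pvHollow = b1 at *
      generalize hpIeq : pair.getD (iN - 150) 0 = pI at *
      have hseg : ((pvXs b1).drop (pvBisect (pvXs b1) pI)).take
            (pvBisect (pvXs b1) ((iN : Int) - 150) - pvBisect (pvXs b1) pI) =
          (pvXs b1).filter (fun k => decide (pI ≤ k) && decide (k < (iN : Int) - 150)) :=
        pvBisect_slice (pvXs b1) pI ((iN : Int) - 150) (pvXs_sorted b1)
      have hsegpos : ∀ k ∈ (pvXs b1).filter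
          (fun k => decide (pI ≤ k) && decide (k < (iN : Int) - 150)), 0 ≤ k := by
        intro k hk
        exact ((pvXs_mem b1 k).mp (List.mem_filter.mp hk).1).1
      have hAchar := pvAKLoop_getD ((((iN : Int) - 150) - pI).toNat) b1 pI ((iN : Int) - 150)
        rfl hp0
      have heq : ((pvXs b1).filter
            (fun k => decide (pI ≤ k) && decide (k < (iN : Int) - 150))).foldl
            (fun bb k => PySem.List.pySetD bb k "X") b1 =
          pvAKLoop b1 pI ((iN : Int) - 150) := by
        apply List.ext_getElem
        · rw [length_pvFoldX, length_pvAKLoop]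
        · intro q hq1 hq2
          have hqb : q < b1.length := by rw [length_pvFoldX] at hq1; exact hq1
          rw [← List.getD_eq_getElem _ "" hq1, ← List.getD_eq_getElem _ "" hq2]
          rw [pvFoldX_getD _ b1 hsegpos q hqb, hAchar q hqb]
          have hmemiff : (Int.ofNat q ∈ (pvXs b1).filter
              (fun k => decide (pI ≤ k) && decide (k < (iN : Int) - 150))) ↔
              (pI ≤ (q : Int) ∧ (q : Int) < (iN : Int) - 150 ∧ b1.getD q "" = "x") := by
            rw [List.mem_filter, pvXs_mem]
            rw [show Int.ofNat q = ((q : Nat) : Int) from rfl]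
            constructor
            · rintro ⟨⟨_, _, hxq⟩, hb⟩
              simp only [Bool.and_eq_true, decide_eq_true_eq] at hb
              exact ⟨hb.1, hb.2, by simpa using hxq⟩
            · rintro ⟨hh1, hh2, hh3⟩
              refine ⟨⟨Int.natCast_nonneg q, by simpa using hqb, by simpa using hh3⟩, ?_⟩
              simp only [Bool.and_eq_true, decide_eq_true_eq]
              exact ⟨hh1, hh2⟩
          by_cases hc : pI ≤ (q : Int) ∧ (q : Int) < (iN : Int) - 150 ∧ b1.getD q "" = "x"
          · rw [if_pos (hmemiff.mpr hc), if_pos hc]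
          · rw [if_neg (fun hh => hc (hmemiff.mp hh)), if_neg hc]
      have hxs2 : (pvXs b1).take (pvBisect (pvXs b1) pI) ++
            (pvXs b1).drop
              (max (pvBisect (pvXs b1) pI) (pvBisect (pvXs b1) ((iN : Int) - 150))) =
          pvXs (pvAKLoop b1 pI ((iN : Int) - 150)) := by
        rw [pvBisect_rest (pvXs b1) pI ((iN : Int) - 150) (pvXs_sorted b1)]
        symm
        have hf := pvXs_filter (pvAKLoop b1 pI ((iN : Int) - 150)) b1
          (fun k => ¬ (pI ≤ k ∧ k < (iN : Int) - 150)) (length_pvAKLoop b1 pI ((iN : Int) - 150))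
          (by
            intro q hq
            rw [hAchar q (by omega)]
            rw [show Int.ofNat q = ((q : Nat) : Int) from rfl]
            by_cases hc : pI ≤ (q : Int) ∧ (q : Int) < (iN : Int) - 150 ∧ b1.getD q "" = "x"
            · rw [if_pos hc]
              constructor
              · intro hcon; exact absurd hcon (by decide)
              · intro hcon
                exfalso; apply hcon.2
                exact ⟨hc.1, hc.2.1⟩
            · rw [if_neg hc]
              constructor
              · intro hcon
                refine ⟨hcon, ?_⟩
                intro hcon2
                exact hc ⟨hcon2.1, hcon2.2, hcon⟩
              · intro hcon; exact hcon.1)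
        rw [hf]
        apply List.filter_congr
        intro k _
        simp only [decide_not, Bool.decide_and]
      refine ⟨?_, ?_, ?_⟩
      · simp only [pvAKL, pvBKL, if_pos h150, hgd, if_pos hbr, hgp, hsetd, hsetp,
          hxs1, hseg, heq, hxs2]
      · simp only [pvAKL, if_pos h150, hgd, if_pos hbr, hgp, hsetd, hsetp]
        rw [length_pvAKLoop, hlen1]
      · intro q hq hxq
        simp only [pvAKL, if_pos h150, hgd, if_pos hbr, hgp, hsetd, hsetp] at hxq
        rw [hAchar q (by omega)] at hxq
        by_cases hc : pI ≤ (q : Int) ∧ (q : Int) < (iN : Int) - 150 ∧ b1.getD q "" = "x"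
        · rw [if_pos hc] at hxq
          exact absurd hxq (by decide)
        · rw [if_neg hc] at hxq
          rw [hb1get q hq] at hxq
          by_cases h1 : q = pI.toNat
          · rw [if_pos h1] at hxq; exact absurd hxq (by decide)
          · rw [if_neg h1] at hxq
            by_cases h2 : q = iN - 150
            · rw [if_pos h2] at hxq; exact absurd hxq (by decide)
            · rw [if_neg h2] at hxq; exact hxq

theorem pvStep_agree (struc : List String) (pair : List Int) (n iN : Nat) (b : List String)
    (t : Int) (hlen : b.length = n) (hiN : iN < n)
    (hx : ∀ p, p < n → b.getD p "" = "x" → p < iN ∧ struc.getD p "" = "(")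
    (hclose : struc.getD iN "" = ")" →
      0 ≤ pair.getD iN 0 ∧ pair.getD iN 0 < (n : Int))
    (hkl : iN > 150 → struc.getD (iN - 150) "" = "]" →
      0 ≤ pair.getD (iN - 150) 0 ∧ pair.getD (iN - 150) 0 < (n : Int)) :
    pvBStep struc pair (b, t, pvXs b) (iN : Int) =
      ((pvAStep struc pair (b, t) (iN : Int)).1, (pvAStep struc pair (b, t) (iN : Int)).2,
        pvXs (pvAStep struc pair (b, t) (iN : Int)).1) ∧
    (pvAStep struc pair (b, t) (iN : Int)).1.length = n ∧
    (∀ p, p < n → (pvAStep struc pair (b, t) (iN : Int)).1.getD p "" = "x" →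
      p < iN + 1 ∧ struc.getD p "" = "(") := by
  have hch : PySem.List.pyGetD struc (iN : Int) "" = struc.getD iN "" := by simp
  have hmi : PySem.List.pyGetD pair (iN : Int) 0 = pair.getD iN 0 := by simp
  obtain ⟨hm1, hm2, hm3⟩ := pvMain_agree struc n iN b t (pair.getD iN 0) hlen hiN hx hclose
  obtain ⟨hk1, hk2, hk3⟩ := pvKL_agree struc pair n iN
    (pvAMain b t (struc.getD iN "") (pair.getD iN 0) (iN : Int)).1 hm2 hiN
    (fun p hp hxp => (hm3 p hp hxp).2) hkl
  simp only [pvAStep, pvBStep, hch, hmi, hm1, hk1]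
  refine ⟨by trivial, hk2, ?_⟩
  intro p hp hxp
  exact hm3 p hp (hk3 p hp hxp)

theorem pvFold_agree (struc : List String) (pair : List Int) (n : Nat)
    (hclose : ∀ i, i < n → struc.getD i "" = ")" →
      0 ≤ pair.getD i 0 ∧ pair.getD i 0 < (n : Int))
    (hkl : ∀ d, 1 ≤ d → d + 150 < n → struc.getD d "" = "]" →
      0 ≤ pair.getD d 0 ∧ pair.getD d 0 < (n : Int)) :
    ∀ m, m ≤ n →
      (List.range m).foldl (fun st (k : Nat) => pvBStep struc pair st (k : Int))
          (List.replicate n pvHollow, 0, ([] : List Int)) =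
        (((List.range m).foldl (fun st (k : Nat) => pvAStep struc pair st (k : Int))
            (List.replicate n pvHollow, 0)).1,
         ((List.range m).foldl (fun st (k : Nat) => pvAStep struc pair st (k : Int))
            (List.replicate n pvHollow, 0)).2,
         pvXs ((List.range m).foldl (fun st (k : Nat) => pvAStep struc pair st (k : Int))
            (List.replicate n pvHollow, 0)).1) ∧
      ((List.range m).foldl (fun st (k : Nat) => pvAStep struc pair st (k : Int))
          (List.replicate n pvHollow, 0)).1.length = n ∧
      (∀ p, p < n → ((List.range m).foldl (fun st (k : Nat) => pvAStep struc pair st (k : Int))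
          (List.replicate n pvHollow, 0)).1.getD p "" = "x" →
        p < m ∧ struc.getD p "" = "(") := by
  intro m
  induction m with
  | zero =>
    intro _
    simp only [List.range_zero, List.foldl_nil]
    refine ⟨?_, by simp, ?_⟩
    · rw [pvXs_replicate n pvHollow (by decide)]
    · intro p hp hxp
      exfalso
      rw [List.getD_eq_getElem _ _ (by simpa using hp)] at hxp
      rw [List.getElem_replicate] at hxp
      exact absurd hxp (by decide)
  | succ m ih =>
    intro hm
    obtain ⟨ih1, ih2, ih3⟩ := ih (by omega)
    rw [List.range_succ, List.foldl_append, List.foldl_append]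
    simp only [List.foldl_cons, List.foldl_nil]
    rw [ih1]
    obtain ⟨hs1, hs2, hs3⟩ := pvStep_agree struc pair n m
      ((List.range m).foldl (fun st (k : Nat) => pvAStep struc pair st (k : Int))
        (List.replicate n pvHollow, 0)).1
      ((List.range m).foldl (fun st (k : Nat) => pvAStep struc pair st (k : Int))
        (List.replicate n pvHollow, 0)).2
      ih2 (by omega)
      (fun p hp hxp => ih3 p hp hxp)
      (hclose m (by omega))
      (fun h150 => hkl (m - 150) (by omega) (by omega))
    constructor
    · rw [hs1]
    · exact ⟨hs2, hs3⟩

-- ===== VERDICT (by name: the statement is the Claim_ definition above) =====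
theorem compute_barriers_py_spec : Claim_equal_compute_barriers_py := by
  intro struc pair nt _hdom hpre
  unfold Spec_compute_barriers_py
  unfold compute_barriers_py compute_barriers_py_alt
  obtain ⟨hsl, hpl, hidx⟩ := hpre
  rcases Int.lt_or_le nt 0 with hneg | hnn
  · rw [PySem.List.pyRange_one_eq_nil (by omega)]
    simp
  · have hrange : PySem.List.pyRange 0 nt 1 = (List.range nt.toNat).map (fun k : Nat => (k : Int)) := by
      rw [show nt = ((nt.toNat : Nat) : Int) by omega]
      exact PySem.List.pyRange_zero_natCast nt.toNat
    rw [hrange, List.foldl_map, List.foldl_map]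
    have h := pvFold_agree struc pair nt.toNat
      (fun i hi hc => by
        have := (hidx i hi).1 hc
        omega)
      (fun d h1 h2 hc => by
        have := (hidx d (by omega)).2 h1 (by omega) hc
        omega)
      nt.toNat le_rfl
    rw [h.1]
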